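-- pv_equiv track=rewrite | github.com/enicolasgomez/finance-ml | tadata.py | count_pattern
-- ===== SOURCE A (Python) =====
-- def count_pattern(pattern, lastn):
--     total_list = [0] * len(pattern)
--     for i in range(lastn, len(pattern)):
--         total = 0
--         for j in range(1, lastn):
--             if pattern[(i-j)] == 100 :
--                 total = total + 1
--         total_list[i] = total
--     return total_list
-- ===== SOURCE B (Python) =====
-- def count_pattern(pattern, lastn):
--     n = len(pattern)
--     if lastn < 2:
--         return [0] * n
--     pref = [0]
--     for v in pattern:
--         pref.append(pref[-1] + (v == 100))
--     return [pref[i] - pref[i - lastn + 1] if i >= lastn else 0 for i in range(n)]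
-- ===== Notes on version B (the rewrite author's own statement) =====
-- stated objective: faster
-- what changed: Replaces the quadratic per-position rescan of the last lastn-1 values with a prefix-sum table of counts of 100, so each output is one subtraction.
import Mathlib
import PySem

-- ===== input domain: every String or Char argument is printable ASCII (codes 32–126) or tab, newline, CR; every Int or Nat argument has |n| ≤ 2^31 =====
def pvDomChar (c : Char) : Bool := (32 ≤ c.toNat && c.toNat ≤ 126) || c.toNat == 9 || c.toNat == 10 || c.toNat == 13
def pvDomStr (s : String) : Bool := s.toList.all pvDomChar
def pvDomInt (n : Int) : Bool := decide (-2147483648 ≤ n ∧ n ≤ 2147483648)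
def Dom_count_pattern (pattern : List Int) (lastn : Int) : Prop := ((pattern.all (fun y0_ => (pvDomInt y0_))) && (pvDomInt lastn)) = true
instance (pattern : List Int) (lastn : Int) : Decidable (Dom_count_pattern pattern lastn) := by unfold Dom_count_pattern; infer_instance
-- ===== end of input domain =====

-- B replaces A's O(n·lastn) rescan of the trailing window with an O(n) prefix-sum table
-- of counts of 100; one subtraction per output position.

-- ===== PORT A =====
def count_pattern (pattern : List Int) (lastn : Int) : List Int :=
  (PySem.List.pyRange lastn (pattern.length : Int) 1).foldl
    (fun tl i =>
      PySem.List.pySetD tl i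
        ((PySem.List.pyRange 1 lastn 1).foldl
          (fun total j => if PySem.List.pyGetD pattern (i - j) 0 = 100 then total + 1 else total)
          0))
    (List.replicate pattern.length 0)

-- ===== PORT B =====
-- indices i and i - lastn + 1 are nonnegative in the branch where they are used
-- (lastn ≥ 2 and i ≥ lastn), so pyGetD is exact there.
def count_pattern_alt (pattern : List Int) (lastn : Int) : List Int :=
  if lastn < 2 then List.replicate pattern.length 0
  else
    let pref := pattern.foldl
      (fun p v => p ++ [p.getLastD 0 + (if v = 100 then 1 else 0)]) [(0 : Int)]
    (PySem.List.pyRange 0 (pattern.length : Int) 1).map (fun i =>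
      if lastn ≤ i then PySem.List.pyGetD pref i 0 - PySem.List.pyGetD pref (i - lastn + 1) 0
      else 0)

-- ===== PRECONDITION & SPEC =====
-- Pre_ excludes exactly the inputs where A raises IndexError: when lastn < -len(pattern),
-- the first write total_list[lastn] is out of range.
def Pre_count_pattern (pattern : List Int) (lastn : Int) : Prop :=
  -(pattern.length : Int) ≤ lastn
instance (pattern : List Int) (lastn : Int) : Decidable (Pre_count_pattern pattern lastn) := by
  unfold Pre_count_pattern; infer_instance
def pvWitness_count_pattern : List Int × Int := ([100, 3, 100, 100, 5], 3)

def Spec_count_pattern (pattern : List Int) (lastn : Int) (out : List Int) : Prop :=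
  out = count_pattern_alt pattern lastn
instance (pattern : List Int) (lastn : Int) (out : List Int) : Decidable (Spec_count_pattern pattern lastn out) := by
  unfold Spec_count_pattern; infer_instance

-- ===== CLAIM (what is proved, stated in full; the proofs are below) =====
def Claim_equal_count_pattern : Prop := ∀ (pattern : List Int) (lastn : Int), Dom_count_pattern pattern lastn → Pre_count_pattern pattern lastn → Spec_count_pattern pattern lastn (count_pattern pattern lastn)

-- ===== LEMMAS AND PROOFS =====

-- count of 100 among the first k elements, as an Int
def cnt (pattern : List Int) (k : Nat) : Int :=
  ((pattern.take k).countP (fun v => v == 100) : Int)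

lemma cnt_append_le (ys : List Int) (v : Int) (k : Nat) (hk : k ≤ ys.length) :
    cnt (ys ++ [v]) k = cnt ys k := by
  unfold cnt
  rw [List.take_append_of_le_length hk]

lemma cnt_succ (pattern : List Int) (k : Nat) (hk : k < pattern.length) :
    cnt pattern (k + 1) = cnt pattern k + (if pattern.getD k 0 = 100 then 1 else 0) := by
  unfold cnt
  rw [List.take_add_one, List.countP_append]
  rw [List.getElem?_eq_getElem hk]
  rw [List.getD_eq_getElem _ _ hk]
  by_cases hv : pattern[k] = 100 <;> simp [hv]

-- characterisation of B's prefix-sum list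
lemma pref_spec (pattern : List Int) :
    pattern.foldl (fun p v => p ++ [p.getLastD 0 + (if v = 100 then 1 else 0)]) [(0 : Int)]
      = (List.range (pattern.length + 1)).map (fun k => cnt pattern k) := by
  induction pattern using List.reverseRecOn with
  | nil => simp [cnt]
  | append_singleton ys v ih =>
    rw [List.foldl_append, ih]
    simp only [List.foldl_cons, List.foldl_nil, List.length_append, List.length_singleton]
    have hr : List.range (ys.length + 1 + 1) = List.range (ys.length + 1) ++ [ys.length + 1] :=
      List.range_succ
    rw [hr, List.map_append]
    have hlast : ((List.range (ys.length + 1)).map (fun k => cnt ys k)).getLastD 0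
        = cnt ys ys.length := by
      rw [List.getLastD_eq_getLast?, List.getLast?_eq_getElem?]
      simp
    congr 1
    · apply List.map_congr_left
      intro k hk
      simp only [List.mem_range] at hk
      rw [cnt_append_le ys v k (by omega)]
    · rw [hlast]
      simp only [List.map_singleton, List.cons.injEq, and_true]
      unfold cnt
      rw [show ys.length + 1 = (ys ++ [v]).length by simp]
      simp only [List.take_length, List.countP_append]
      by_cases hv : v = 100 <;> simp [hv]

-- reading B's prefix list at a nonnegative in-range index
lemma pref_getD (pattern : List Int) (j : Int) (h0 : 0 ≤ j) (hj : j ≤ (pattern.length : Int)) :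
    PySem.List.pyGetD
        (pattern.foldl (fun p v => p ++ [p.getLastD 0 + (if v = 100 then 1 else 0)]) [(0 : Int)])
        j 0
      = cnt pattern j.toNat := by
  rw [PySem.List.pyGetD_of_nonneg _ 0 h0, pref_spec]
  have hjn : j.toNat < pattern.length + 1 := by omega
  rw [List.getD_eq_getElem?_getD, List.getElem?_map, List.getElem?_range hjn]
  simp

-- A's inner loop equals a prefix-sum difference
lemma inner_eq (pattern : List Int) (i : Int) (m : Nat) (hm : 1 ≤ m)
    (hmi : (m : Int) ≤ i) (hin : i < (pattern.length : Int)) :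
    (PySem.List.pyRange 1 (m : Int) 1).foldl
        (fun total j => if PySem.List.pyGetD pattern (i - j) 0 = 100 then total + 1 else total) 0
      = cnt pattern i.toNat - cnt pattern (i - m + 1).toNat := by
  induction m with
  | zero => omega
  | succ m ihm =>
    rcases Nat.eq_or_lt_of_le hm with h1 | h1
    · have : m = 0 := by omega
      subst this
      rw [show ((0 + 1 : Nat) : Int) = 1 by norm_num,
          PySem.List.pyRange_one_eq_nil le_rfl]
      rw [show i - (1:Int) + 1 = i by ring]
      simp
    · have hm1 : 1 ≤ m := by omega
      rw [show ((m + 1 : Nat) : Int) = (m : Int) + 1 by push_cast; ring,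
          PySem.List.pyRange_one_succ_right (by exact_mod_cast hm1), List.foldl_append]
      rw [ihm hm1 (by omega)]
      simp only [List.foldl_cons, List.foldl_nil]
      have hge : (0:Int) ≤ i - m := by omega
      have hget : PySem.List.pyGetD pattern (i - m) 0 = pattern.getD (i - m).toNat 0 :=
        PySem.List.pyGetD_of_nonneg pattern 0 hge
      have hsucc := cnt_succ pattern (i - m).toNat (by omega)
      have e1 : (i - m).toNat + 1 = (i - m + 1).toNat := by omega
      rw [hget, show i - ((m:Int) + 1) + 1 = i - m by ring, ← e1, hsucc]
      split_ifs with hv <;> ring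

lemma setD_zero_replicate (n : Nat) (i : Int) :
    PySem.List.pySetD (List.replicate n (0 : Int)) i 0 = List.replicate n 0 := by
  unfold PySem.List.pySetD PySem.List.pySet?
  cases h : PySem.List.pyIdx? (List.replicate n (0:Int)).length i with
  | none => simp
  | some k => simp [List.set_replicate_self]

lemma fold_zero (idxs : List Int) (n : Nat) :
    idxs.foldl (fun l i => PySem.List.pySetD l i 0) (List.replicate n (0 : Int))
      = List.replicate n 0 := by
  induction idxs with
  | nil => rfl
  | cons i rest ih => simp only [List.foldl_cons, setD_zero_replicate, ih]

-- scatter: a foldl of independent writes, read back pointwise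
lemma scatter (f : Int → Int) (idxs : List Int) (base : List Int)
    (h : ∀ i ∈ idxs, 0 ≤ i ∧ i < (base.length : Int)) (k : Nat) :
    (idxs.foldl (fun l i => PySem.List.pySetD l i (f i)) base)[k]?
      = if (k : Int) ∈ idxs then some (f k) else base[k]? := by
  induction idxs generalizing base with
  | nil => simp
  | cons i rest ih =>
    have hi := h i (by simp)
    have hset : PySem.List.pySetD base i (f i) = base.set i.toNat (f i) :=
      PySem.List.pySetD_of_nonneg _ _ hi.1
    simp only [List.foldl_cons, hset]
    rw [ih (base.set i.toNat (f i))
        (by simpa [List.length_set] using fun j hj => h j (List.mem_cons_of_mem _ hj))]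
    by_cases hk : (k : Int) ∈ rest
    · simp [hk]
    · simp only [hk, if_false, List.mem_cons]
      by_cases hki : (k : Int) = i
      · have : i.toNat = k := by omega
        subst this
        have : i.toNat < base.length := by omega
        simp [this, hki]
      · have : i.toNat ≠ k := by omega
        simp [List.getElem?_set_ne this, hki]

-- ===== VERDICT (by name: the statement is the Claim_ definition above) =====
theorem count_pattern_spec : Claim_equal_count_pattern := by
  intro pattern lastn _ _
  unfold Spec_count_pattern count_pattern count_pattern_alt
  by_cases hl : lastn < 2
  · rw [if_pos hl]
    rw [PySem.List.pyRange_one_eq_nil (show lastn ≤ 1 by omega)]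
    simp only [List.foldl_nil]
    exact fold_zero _ _
  · rw [if_neg hl]
    replace hl : 2 ≤ lastn := by omega
    apply List.ext_getElem?
    intro k
    set n := pattern.length with hn
    have hmem : ∀ i ∈ PySem.List.pyRange lastn (n : Int) 1,
        0 ≤ i ∧ i < ((List.replicate n (0:Int)).length : Int) := by
      intro i hi
      rw [PySem.List.mem_pyRange_one] at hi
      simp only [List.length_replicate]
      omega
    rw [scatter (fun i =>
          (PySem.List.pyRange 1 lastn 1).foldl
            (fun total j => if PySem.List.pyGetD pattern (i - j) 0 = 100 then total + 1 else total)
            0)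
        (PySem.List.pyRange lastn (n : Int) 1) (List.replicate n 0) hmem k]
    by_cases hkn : k < n
    · rw [PySem.List.getElem?_map_pyRange_zero _ _ _ hkn]
      by_cases hlk : lastn ≤ (k : Int)
      · rw [if_pos (by rw [PySem.List.mem_pyRange_one]; omega), if_pos hlk]
        have hlt : ((lastn.toNat : Int)) = lastn := by omega
        have := inner_eq pattern (k : Int) lastn.toNat (by omega)
          (by omega) (by omega)
        rw [hlt] at this
        rw [this]
        rw [pref_getD pattern (k : Int) (by omega) (by omega),
            pref_getD pattern ((k : Int) - lastn + 1) (by omega) (by omega)]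
      · rw [if_neg (by rw [PySem.List.mem_pyRange_one]; omega), if_neg hlk]
        simp [hkn]
    · rw [if_neg (by rw [PySem.List.mem_pyRange_one]; omega)]
      rw [List.getElem?_eq_none (by simp [Nat.le_of_not_lt hkn]),
          List.getElem?_eq_none]
      rw [List.length_map, PySem.List.length_pyRange_one]
      omega
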